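-- pv_equiv track=rewrite | github.com/zouyu9631/cp_for_fun | atcoder/contest/arc197/d/d.py | treeOk
-- ===== SOURCE A (Python) =====
-- def treeOk(par, root):
--     m = len(par)
--     g = [[] for _ in range(m)]
--     for v, p in enumerate(par):
--         if p != -1:
--             g[p].append(v)
--     vis = [False] * m
--     stk = [root]
--     vis[root] = True
--     while stk:
--         v = stk.pop()
--         for w in g[v]:
--             if vis[w]:
--                 return False
--             vis[w] = True
--             stk.append(w)
--     return all(vis)
-- ===== SOURCE B (Python) =====
-- def treeOk(par, root):
--     # A parent array describes a tree rooted at `root` iff the root has no parent,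
--     # exactly one slot is parentless, and every node's parent chain terminates.
--     m = len(par)
--     if par[root] != -1 or par.count(-1) != 1:
--         return False
--     for v in range(m):
--         cur, steps = v, 0
--         while par[cur] != -1:
--             if steps == m:
--                 return False
--             cur = par[cur]
--             steps += 1
--     return True
-- ===== Notes on version B (the rewrite author's own statement) =====
-- stated objective: alternative
-- what changed: Replaces A's children-adjacency-list + explicit-stack DFS with visited array by a direct characterisation: the root slot holds -1, exactly one slot holds -1, and every node's upward parent chain terminates within m steps; no adjacency list, stack or visited array is built. Pre_ excludes only inputs on which A raises IndexError (empty par, or root / a non-(-1) entry outside the valid index range).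
import Mathlib
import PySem

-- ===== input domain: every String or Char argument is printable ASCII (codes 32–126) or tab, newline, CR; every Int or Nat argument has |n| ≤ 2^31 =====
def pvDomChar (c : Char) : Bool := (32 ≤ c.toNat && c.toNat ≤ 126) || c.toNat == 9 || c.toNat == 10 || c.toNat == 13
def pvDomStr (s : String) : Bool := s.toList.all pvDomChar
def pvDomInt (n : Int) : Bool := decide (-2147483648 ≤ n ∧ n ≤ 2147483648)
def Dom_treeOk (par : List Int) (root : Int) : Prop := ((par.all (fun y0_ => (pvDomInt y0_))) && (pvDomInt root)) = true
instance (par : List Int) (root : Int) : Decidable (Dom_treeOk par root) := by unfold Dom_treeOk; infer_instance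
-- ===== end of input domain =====

-- B replaces A's children-adjacency-list + explicit-stack DFS with visited array by a direct
-- characterisation: the root slot holds -1, exactly one slot holds -1, and every node's upward
-- parent chain terminates within m steps; same return value wherever A returns.

-- ===== PORT A =====
-- g[p].append(v); a no-op where Python would raise IndexError (such inputs are excluded by Pre_)
def pvAddChild (g : List (List Int)) (p : Int) (v : Int) : List (List Int) :=
  PySem.List.pySetD g p (PySem.List.pyGetD g p [] ++ [v])

-- `for v, p in enumerate(par): if p != -1: g[p].append(v)`
def pvBuildG (par : List Int) : List (List Int) :=
  (PySem.List.enumerate par 0).foldl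
    (fun g vp => if vp.2 ≠ -1 then pvAddChild g vp.2 vp.1 else g)
    (List.replicate par.length [])

-- inner `for w in g[v]` loop; `none` = the early `return False`
-- (pyGet? vis w = none is Python's IndexError there; unreachable under Pre_)
def pvScan : List Bool → List Int → List Int → Option (List Bool × List Int)
  | vis, stk, [] => some (vis, stk)
  | vis, stk, w :: ws =>
    match PySem.List.pyGet? vis w with
    | none => none
    | some b =>
      if b then none
      else pvScan (PySem.List.pySetD vis w true) (w :: stk) ws

-- normalised (wrapped) Python index, as pyIdx? computes it
def nrm (len : Nat) (i : Int) : Nat := if 0 ≤ i then i.toNat else len - (-i).toNat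

theorem pyIdx?_eq_nrm {len : Nat} {i : Int} (h : PySem.Raise.InRange len i) :
    PySem.List.pyIdx? len i = some (nrm len i) := by
  obtain ⟨h1, h2⟩ := h
  simp only [PySem.List.pyIdx?, nrm]
  split_ifs <;> first | rfl | omega

theorem pyGet?_nrm {α : Type} {xs : List α} {i : Int} (h : PySem.Raise.InRange xs.length i) :
    PySem.List.pyGet? xs i = xs[nrm xs.length i]? := by
  simp only [PySem.List.pyGet?, pyIdx?_eq_nrm h, Option.bind_some]

theorem pySetD_nrm {α : Type} {xs : List α} {i : Int} {x : α}
    (h : PySem.Raise.InRange xs.length i) :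
    PySem.List.pySetD xs i x = xs.set (nrm xs.length i) x := by
  simp only [PySem.List.pySetD, PySem.List.pySet?, pyIdx?_eq_nrm h, Option.map_some,
    Option.getD_some]

theorem count_false_set : ∀ (vis : List Bool) (n : Nat), vis[n]? = some false →
    (vis.set n true).count false + 1 = vis.count false := by
  intro vis
  induction vis with
  | nil => intro n h; simp at h
  | cons b t ih =>
    intro n h
    cases n with
    | zero =>
      simp only [List.getElem?_cons_zero, Option.some.injEq] at h
      subst h
      simp
    | succ k =>
      simp only [List.getElem?_cons_succ] at h
      have := ih k h
      rw [List.set_cons_succ]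
      simp only [List.count_cons]
      split <;> omega

-- each successful pvScan step flips an in-range `false` to `true` and pushes once
theorem pvScan_measure : ∀ (ws : List Int) (vis : List Bool) (stk : List Int)
    (vis' : List Bool) (stk' : List Int), pvScan vis stk ws = some (vis', stk') →
    2 * vis'.count false + stk'.length ≤ 2 * vis.count false + stk.length := by
  intro ws
  induction ws with
  | nil =>
    intro vis stk vis' stk' h
    simp only [pvScan, Option.some.injEq, Prod.mk.injEq] at h
    obtain ⟨h1, h2⟩ := h
    subst h1; subst h2; omega
  | cons w ws ih =>
    intro vis stk vis' stk' h
    simp only [pvScan] at h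
    cases hg : PySem.List.pyGet? vis w with
    | none => rw [hg] at h; simp at h
    | some b =>
      rw [hg] at h
      cases b with
      | true => simp at h
      | false =>
        simp only [if_neg Bool.false_ne_true] at h
        have hin : PySem.Raise.InRange vis.length w := by
          by_contra hc
          rw [← PySem.List.pyGet?_eq_none_iff] at hc
          simp [hc] at hg
        have hget : vis[nrm vis.length w]? = some false := by
          rw [← pyGet?_nrm hin]; exact hg
        have hcnt := count_false_set vis (nrm vis.length w) hget
        have hset : PySem.List.pySetD vis w true = vis.set (nrm vis.length w) true :=
          pySetD_nrm hin
        have := ih (PySem.List.pySetD vis w true) (w :: stk) vis' stk' h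
        rw [hset] at this
        simp only [List.length_cons] at this
        omega

-- `while stk:` loop; the stack is held head-first (pop = head, push = cons), the same LIFO order
def pvLoop (g : List (List Int)) (vis : List Bool) (stk : List Int) : Bool :=
  match stk with
  | [] => vis.all (fun b => b)
  | v :: rest =>
    match h : pvScan vis rest (PySem.List.pyGetD g v []) with
    | none => false
    | some (vis', stk') => pvLoop g vis' stk'
termination_by 2 * vis.count false + stk.length
decreasing_by
  have := pvScan_measure (PySem.List.pyGetD g v []) vis rest vis' stk' h
  simp only [List.length_cons]
  omega

def treeOk (par : List Int) (root : Int) : Bool :=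
  let m := par.length
  let g := pvBuildG par
  let vis := PySem.List.pySetD (List.replicate m false) root true
  pvLoop g vis [root]

-- ===== PORT B =====
-- the `while par[cur] != -1` climb; fuel counts the remaining allowed steps (m - steps in Source B)
def pvChain (par : List Int) (fuel : Nat) (cur : Int) : Bool :=
  match PySem.List.pyGet? par cur with
  | none => false
  | some p =>
    if p = -1 then true
    else
      match fuel with
      | 0 => false
      | f + 1 => pvChain par f p

def treeOk_alt (par : List Int) (root : Int) : Bool :=
  let m := par.length
  match PySem.List.pyGet? par root with
  | none => false
  | some q =>
    if q ≠ -1 ∨ PySem.List.count par (-1) ≠ 1 then false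
    else (List.range m).all (fun v => pvChain par m ((v : Nat) : Int))

-- ===== PRECONDITION & SPEC =====
-- exactly the inputs on which A returns: par non-empty, root a valid Python index of par,
-- and every entry a valid Python index of par (entry -1 is both valid and the "no parent" mark);
-- anywhere else A raises IndexError (len(par)=0 or an out-of-range index at vis[root] / g[p])
def Pre_treeOk (par : List Int) (root : Int) : Prop :=
  par ≠ [] ∧ PySem.Raise.InRange par.length root ∧ ∀ p ∈ par, PySem.Raise.InRange par.length p
instance (par : List Int) (root : Int) : Decidable (Pre_treeOk par root) := by
  unfold Pre_treeOk; infer_instance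
def pvWitness_treeOk : List Int × Int := ([-1, 0, 0], 0)

def Spec_treeOk (par : List Int) (root : Int) (out : Bool) : Prop := out = treeOk_alt par root
instance (par : List Int) (root : Int) (out : Bool) : Decidable (Spec_treeOk par root out) := by
  unfold Spec_treeOk; infer_instance

-- ===== CLAIM (what is proved, stated in full; the proofs are below) =====
def Claim_equal_treeOk : Prop := ∀ (par : List Int) (root : Int), Dom_treeOk par root → Pre_treeOk par root → Spec_treeOk par root (treeOk par root)

-- ===== LEMMAS AND PROOFS =====

-- the parent step of node v: none = no parent (entry -1), some u = parent with canonical index u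
def pstep (par : List Int) (v : Int) : Option Int :=
  match PySem.List.pyGet? par v with
  | none => none
  | some p => if p = -1 then none else some (PySem.Int.mod p par.length)

def piter (par : List Int) : Nat → Int → Option Int
  | 0, v => some v
  | k + 1, v => (pstep par v).bind (piter par k)

-- v's parent chain reaches the (wrapped) root
def UpReach (par : List Int) (root : Int) (v : Int) : Prop :=
  ∃ k, piter par k v = some ((nrm par.length root : Nat) : Int)

-- the common characterisation both programs are proved equal to
def RHS (par : List Int) (root : Int) : Prop :=
  pstep par ((nrm par.length root : Nat) : Int) = none ∧
    ∀ n : Nat, n < par.length → UpReach par root (n : Int)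

theorem nrm_lt {len : Nat} {i : Int} (h : PySem.Raise.InRange len i) : nrm len i < len := by
  obtain ⟨h1, h2⟩ := h
  unfold nrm
  split <;> omega

theorem nrm_natCast {len n : Nat} (h : n < len) : nrm len (n : Int) = n := by
  unfold nrm
  split <;> omega

theorem mod_nrm {len : Nat} {i : Int} (h : PySem.Raise.InRange len i) :
    PySem.Int.mod i (len : Int) = ((nrm len i : Nat) : Int) := by
  obtain ⟨h1, h2⟩ := h
  have hlen : 0 < (len : Int) := by omega
  have hm : PySem.Int.mod i (len : Int) = i % (len : Int) := by
    simp only [PySem.Int.mod]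
    rw [Int.fmod_eq_emod]
    simp [hlen.le]
  rw [hm]
  unfold nrm
  split_ifs with hi
  · rw [Int.emod_eq_of_lt hi h2]; omega
  · have : i % (len : Int) = (i + len) % (len : Int) := (Int.add_emod_right i len).symm
    rw [this, Int.emod_eq_of_lt (by omega) (by omega)]
    omega

theorem getD_set_lt {α : Type} (xs : List α) (i n : Nat) (v d : α) (h : i < xs.length) :
    (xs.set i v).getD n d = if n = i then v else xs.getD n d := by
  rcases eq_or_ne n i with rfl | hn
  · simp [List.getD_eq_getElem?_getD, h]
  · simp [List.getD_eq_getElem?_getD, List.getElem?_set_ne (Ne.symm hn), hn]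

theorem pyGetD_nrm {α : Type} {xs : List α} {i : Int} {d : α}
    (h : PySem.Raise.InRange xs.length i) :
    PySem.List.pyGetD xs i d = xs.getD (nrm xs.length i) d := by
  simp only [PySem.List.pyGetD, PySem.List.pyGet?, pyIdx?_eq_nrm h, Option.bind_some,
    List.getD_eq_getElem?_getD]

theorem inRange_of_pyGet?_some {α : Type} {xs : List α} {i : Int} {x : α}
    (h : PySem.List.pyGet? xs i = some x) : PySem.Raise.InRange xs.length i := by
  by_contra hc
  rw [← PySem.List.pyGet?_eq_none_iff] at hc
  simp [hc] at h

theorem getD_of_pyGet?_some {α : Type} {xs : List α} {i : Int} {x : α} {d : α}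
    (h : PySem.List.pyGet? xs i = some x) : xs.getD (nrm xs.length i) d = x := by
  have hin := inRange_of_pyGet?_some h
  rw [pyGet?_nrm hin] at h
  simp [List.getD_eq_getElem?_getD, h]

-- characterisation of a successful inner scan
theorem pvScan_some_char : ∀ (ws : List Int) (vis : List Bool) (stk : List Int)
    (vis' : List Bool) (stk' : List Int),
    pvScan vis stk ws = some (vis', stk') →
    vis'.length = vis.length ∧
    stk' = ws.reverse ++ stk ∧
    (∀ n : Nat, vis'.getD n false = true ↔
      (vis.getD n false = true ∨ ∃ w ∈ ws, nrm vis.length w = n)) ∧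
    (∀ w ∈ ws, PySem.Raise.InRange vis.length w ∧ vis.getD (nrm vis.length w) false = false) ∧
    (ws.map (nrm vis.length)).Nodup := by
  intro ws
  induction ws with
  | nil =>
    intro vis stk vis' stk' h
    simp only [pvScan, Option.some.injEq, Prod.mk.injEq] at h
    obtain ⟨h1, h2⟩ := h
    subst h1; subst h2
    simp
  | cons w ws ih =>
    intro vis stk vis' stk' h
    simp only [pvScan] at h
    cases hg : PySem.List.pyGet? vis w with
    | none => rw [hg] at h; simp at h
    | some b =>
      rw [hg] at h
      cases b with
      | true => simp at h
      | false =>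
        simp only [if_neg Bool.false_ne_true] at h
        have hin : PySem.Raise.InRange vis.length w := inRange_of_pyGet?_some hg
        have hfresh : vis.getD (nrm vis.length w) false = false := getD_of_pyGet?_some hg
        have hset : PySem.List.pySetD vis w true = vis.set (nrm vis.length w) true :=
          pySetD_nrm hin
        rw [hset] at h
        obtain ⟨ihl, ihs, ihc, ihf, ihnd⟩ := ih _ _ _ _ h
        have hlen1 : (vis.set (nrm vis.length w) true).length = vis.length := by simp
        rw [hlen1] at ihl ihc ihf ihnd
        have hnlt : nrm vis.length w < vis.length := nrm_lt hin
        have hgd : ∀ n : Nat, (vis.set (nrm vis.length w) true).getD n false =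
            if n = nrm vis.length w then true else vis.getD n false := by
          intro n; exact getD_set_lt vis _ n true false hnlt
        refine ⟨ihl, by simp [ihs], ?_, ?_, ?_⟩
        · intro n
          rw [ihc n]
          rw [hgd n]
          by_cases hn : n = nrm vis.length w <;> simp [hn] <;> tauto
        · intro w' hw'
          rcases List.mem_cons.mp hw' with rfl | hw'
          · exact ⟨hin, hfresh⟩
          · obtain ⟨hin', hf'⟩ := ihf w' hw'
            rw [hgd _] at hf'
            refine ⟨hin', ?_⟩
            by_cases hn : nrm vis.length w' = nrm vis.length w
            · rw [hn] at hf'; simp at hf'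
            · rwa [if_neg hn] at hf'
        · simp only [List.map_cons, List.nodup_cons]
          refine ⟨?_, ihnd⟩
          intro hmem
          obtain ⟨w', hw', he⟩ := List.mem_map.mp hmem
          obtain ⟨hin', hf'⟩ := ihf w' hw'
          rw [hgd _, he] at hf'
          simp at hf'

-- an early `return False`: some child already visited before this scan started
theorem pvScan_none_char : ∀ (ws : List Int) (vis : List Bool) (stk : List Int),
    (∀ w ∈ ws, PySem.Raise.InRange vis.length w) →
    (ws.map (nrm vis.length)).Nodup →
    pvScan vis stk ws = none →
    ∃ w ∈ ws, vis.getD (nrm vis.length w) false = true := by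
  intro ws
  induction ws with
  | nil => intro vis stk _ _ h; simp [pvScan] at h
  | cons w ws ih =>
    intro vis stk hws hnd h
    simp only [pvScan] at h
    have hin : PySem.Raise.InRange vis.length w := hws w (List.mem_cons_self)
    cases hg : PySem.List.pyGet? vis w with
    | none =>
      rw [pyGet?_nrm hin] at hg
      simp at hg
      exact absurd (nrm_lt hin) (by omega)
    | some b =>
      rw [hg] at h
      cases b with
      | true => exact ⟨w, List.mem_cons_self, getD_of_pyGet?_some hg⟩
      | false =>
        simp only [if_neg Bool.false_ne_true] at h
        rw [pySetD_nrm hin] at h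
        have hlen1 : (vis.set (nrm vis.length w) true).length = vis.length := by simp
        simp only [List.map_cons, List.nodup_cons] at hnd
        obtain ⟨hnmem, hnd'⟩ := hnd
        obtain ⟨w', hw', hvis'⟩ := ih _ (w :: stk)
          (by intro x hx; rw [hlen1]; exact hws x (List.mem_cons_of_mem _ hx))
          (by rw [hlen1]; exact hnd') h
        rw [hlen1] at hvis'
        refine ⟨w', List.mem_cons_of_mem _ hw', ?_⟩
        have hne : nrm vis.length w' ≠ nrm vis.length w := by
          intro he
          exact hnmem (he ▸ List.mem_map_of_mem hw')
        rw [getD_set_lt vis _ _ true false (nrm_lt hin), if_neg hne] at hvis'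
        exact hvis'

-- parent steps land on canonical indices
theorem pstep_some_range {par : List Int} {v x : Int} (h : pstep par v = some x) :
    ∃ q : Nat, x = (q : Int) ∧ q < par.length := by
  unfold pstep at h
  cases hg : PySem.List.pyGet? par v with
  | none => rw [hg] at h; simp at h
  | some p =>
    rw [hg] at h
    by_cases hp : p = -1
    · simp [hp] at h
    · simp only [if_neg hp, Option.some.injEq] at h
      have hin := inRange_of_pyGet?_some hg
      have hpos : (0 : Int) < (par.length : Int) := by
        obtain ⟨h1, h2⟩ := hin; omega
      have h0 : 0 ≤ PySem.Int.mod p (par.length : Int) := PySem.Int.mod_nonneg p hpos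
      have h1 : PySem.Int.mod p (par.length : Int) < (par.length : Int) :=
        PySem.Int.mod_lt p hpos
      exact ⟨(PySem.Int.mod p (par.length : Int)).toNat, by omega, by omega⟩

theorem pyGet?_nat {par : List Int} {n : Nat} (h : n < par.length) :
    PySem.List.pyGet? par ((n : Nat) : Int) = some (par.getD n 0) := by
  have hin : PySem.Raise.InRange par.length ((n : Nat) : Int) := by
    constructor <;> omega
  rw [pyGet?_nrm hin, nrm_natCast h]
  simp [List.getD_eq_getElem?_getD, List.getElem?_eq_getElem h]

theorem pstep_natCast_char {par : List Int} {n : Nat} (hn : n < par.length)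
    (hpre : ∀ p ∈ par, PySem.Raise.InRange par.length p) :
    pstep par (n : Int) =
      if par.getD n 0 = -1 then none else some ((nrm par.length (par.getD n 0) : Nat) : Int) := by
  unfold pstep
  rw [pyGet?_nat hn]
  show (if par.getD n 0 = -1 then none
    else some (PySem.Int.mod (par.getD n 0) (par.length : Int))) = _
  split_ifs with hp
  · rfl
  · have hmem : par.getD n 0 ∈ par := by
      rw [List.getD_eq_getElem?_getD, List.getElem?_eq_getElem hn]
      exact List.getElem_mem hn
    rw [mod_nrm (hpre _ hmem)]

theorem piter_add (par : List Int) (a b : Nat) (v : Int) :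
    piter par (a + b) v = (piter par a v).bind (fun w => piter par b w) := by
  induction a generalizing v with
  | zero => simp [piter]
  | succ a ih =>
    have : a + 1 + b = (a + b) + 1 := by omega
    rw [this]
    simp only [piter]
    cases pstep par v with
    | none => simp
    | some p => simp [ih p]

theorem piter_range {par : List Int} {k : Nat} {v x : Int}
    (hv : ∃ n : Nat, v = (n : Int) ∧ n < par.length)
    (h : piter par k v = some x) : ∃ q : Nat, x = (q : Int) ∧ q < par.length := by
  cases k with
  | zero => simp only [piter, Option.some.injEq] at h; exact h ▸ hv
  | succ k =>
    induction k generalizing v with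
    | zero =>
      simp only [piter] at h
      cases hs : pstep par v with
      | none => rw [hs] at h; simp at h
      | some p =>
        rw [hs] at h
        simp only [Option.bind_some, piter, Option.some.injEq] at h
        exact h ▸ pstep_some_range hs
    | succ j ih =>
      simp only [piter] at h
      cases hs : pstep par v with
      | none => rw [hs] at h; simp at h
      | some p =>
        rw [hs] at h
        simp only [Option.bind_some] at h
        have hp := pstep_some_range hs
        exact ih (by exact hp) h

-- the per-node child lists the adjacency list holds
def childList (par : List Int) (u : Nat) : List Int :=
  ((List.range par.length).filter
    (fun n : Nat => pstep par ((n : Nat) : Int) == some ((u : Nat) : Int))).map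
    (fun n : Nat => ((n : Nat) : Int))

theorem childList_nodup (par : List Int) (u : Nat) :
    ((childList par u).map (nrm par.length)).Nodup := by
  unfold childList
  rw [List.map_map]
  have : ∀ n ∈ (List.range par.length).filter
      (fun n : Nat => pstep par ((n : Nat) : Int) == some ((u : Nat) : Int)),
      (nrm par.length ∘ fun n : Nat => ((n : Nat) : Int)) n = n := by
    intro n hn
    have := List.mem_range.mp (List.mem_of_mem_filter hn)
    simp [Function.comp, nrm_natCast this]
  rw [List.map_congr_left this]
  simp [List.Nodup.filter, List.nodup_range]

theorem mem_childList {par : List Int} {u : Nat} {w : Int} :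
    w ∈ childList par u ↔ ∃ n : Nat, n < par.length ∧ w = (n : Int) ∧
      pstep par (n : Int) = some ((u : Nat) : Int) := by
  unfold childList
  simp only [List.mem_map, List.mem_filter, List.mem_range, beq_iff_eq]
  constructor
  · rintro ⟨n, ⟨hn, hs⟩, rfl⟩; exact ⟨n, hn, rfl, hs⟩
  · rintro ⟨n, hn, rfl, hs⟩; exact ⟨n, ⟨hn, hs⟩, rfl⟩

theorem enumerate_eq_map_range (par : List Int) :
    PySem.List.enumerate par 0 = (List.range par.length).map
      (fun n : Nat => (((n : Nat) : Int), par.getD n 0)) := by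
  apply List.ext_getElem
  · simp [PySem.List.length_enumerate]
  · intro k h1 h2
    rw [PySem.List.getElem_enumerate]
    simp only [List.getElem_map, List.getElem_range]
    have hk : k < par.length := by simpa [PySem.List.length_enumerate] using h1
    rw [List.getD_eq_getElem?_getD, List.getElem?_eq_getElem hk]
    simp

theorem foldl_build_length : ∀ (L : List (Int × Int)) (g0 : List (List Int)),
    (L.foldl (fun g vp => if vp.2 ≠ -1 then pvAddChild g vp.2 vp.1 else g) g0).length =
      g0.length := by
  intro L
  induction L with
  | nil => intro g0; rfl
  | cons vp L ih =>
    intro g0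
    rw [List.foldl_cons, ih]
    by_cases hp : vp.2 = -1
    · simp [hp]
    · simp only [hp, ne_eq, not_false_iff, if_true, pvAddChild]
      simp [PySem.List.length_pySetD]

theorem foldl_build_getD (m : Nat) (u : Nat) (hu : u < m) :
    ∀ (L : List (Int × Int)) (g0 : List (List Int)), g0.length = m →
    (∀ vp ∈ L, vp.2 = -1 ∨ PySem.Raise.InRange m vp.2) →
    (L.foldl (fun g vp => if vp.2 ≠ -1 then pvAddChild g vp.2 vp.1 else g) g0).getD u [] =
      g0.getD u [] ++
        (L.filter (fun vp => decide (vp.2 ≠ -1 ∧ nrm m vp.2 = u))).map (fun vp => vp.1) := by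
  intro L
  induction L with
  | nil => intro g0 _ _; simp
  | cons vp L ih =>
    intro g0 hg0 hL
    rw [List.foldl_cons]
    by_cases hp : vp.2 = -1
    · rw [if_neg (by simp [hp])]
      rw [ih g0 hg0 (fun x hx => hL x (List.mem_cons_of_mem _ hx))]
      simp [hp]
    · rw [if_pos (by simp [hp])]
      have hin : PySem.Raise.InRange m vp.2 := by
        rcases hL vp List.mem_cons_self with h | h
        · exact absurd h hp
        · exact h
      have hin' : PySem.Raise.InRange g0.length vp.2 := hg0 ▸ hin
      have hadd : pvAddChild g0 vp.2 vp.1 =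
          g0.set (nrm m vp.2) (g0.getD (nrm m vp.2) [] ++ [vp.1]) := by
        unfold pvAddChild
        rw [pySetD_nrm hin', pyGetD_nrm hin', hg0]
      have hlen1 : (pvAddChild g0 vp.2 vp.1).length = m := by
        rw [hadd]; simp [hg0]
      rw [ih _ hlen1 (fun x hx => hL x (List.mem_cons_of_mem _ hx))]
      have hnlt : nrm m vp.2 < m := nrm_lt hin
      rw [hadd, getD_set_lt g0 _ u _ [] (by omega : nrm m vp.2 < g0.length)]
      by_cases he : u = nrm m vp.2
      · rw [if_pos he]
        rw [List.filter_cons_of_pos (by simp [hp, he.symm])]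
        subst he
        simp [List.append_assoc]
      · rw [if_neg he]
        rw [List.filter_cons_of_neg (by simp [hp]; exact fun hq => he hq.symm)]

theorem buildG_length (par : List Int) : (pvBuildG par).length = par.length := by
  unfold pvBuildG
  rw [foldl_build_length]
  simp

theorem buildG_getD (par : List Int)
    (hpre : ∀ p ∈ par, PySem.Raise.InRange par.length p)
    (u : Nat) (hu : u < par.length) :
    (pvBuildG par).getD u [] = childList par u := by
  unfold pvBuildG
  rw [foldl_build_getD par.length u hu _ _ (by simp) ?side]
  case side =>
    intro vp hvp
    rw [enumerate_eq_map_range] at hvp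
    obtain ⟨n, hn, rfl⟩ := List.mem_map.mp hvp
    have hn' := List.mem_range.mp hn
    by_cases hp : par.getD n 0 = -1
    · exact Or.inl hp
    · refine Or.inr (hpre _ ?_)
      rw [List.getD_eq_getElem?_getD, List.getElem?_eq_getElem hn']
      exact List.getElem_mem hn'
  have hrep : (List.replicate par.length ([] : List Int)).getD u [] = [] := by
    simp [List.getD_eq_getElem?_getD]
  rw [hrep, enumerate_eq_map_range, List.filter_map, List.map_map, List.nil_append]
  unfold childList
  have hfil : ∀ n ∈ List.range par.length,
      ((fun vp : Int × Int => decide (vp.2 ≠ -1 ∧ nrm par.length vp.2 = u)) ∘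
        (fun n : Nat => (((n : Nat) : Int), par.getD n 0))) n
      = (pstep par (n : Int) == some ((u : Nat) : Int)) := by
    intro n hn
    have hnm := List.mem_range.mp hn
    rw [pstep_natCast_char hnm hpre]
    show decide (par.getD n 0 ≠ -1 ∧ nrm par.length (par.getD n 0) = u) = _
    split_ifs with hp
    · rw [hp]
      simp
    · rw [Bool.eq_iff_iff]
      simp only [Function.comp_apply, decide_eq_true_eq, beq_iff_eq, Option.some.injEq,
        Nat.cast_inj, ne_eq]
      exact ⟨fun h => h.2, fun h => ⟨hp, h⟩⟩
  rw [List.filter_congr hfil]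
  rfl

theorem piter_prefix_some {par : List Int} {k j : Nat} {v r : Int} (hj : j ≤ k)
    (h : piter par k v = some r) : ∃ y, piter par j v = some y := by
  have : k = j + (k - j) := by omega
  rw [this, piter_add] at h
  cases hy : piter par j v with
  | none => rw [hy] at h; simp at h
  | some y => exact ⟨y, rfl⟩

theorem upreach_bound (par : List Int) (r : Int) {v : Int}
    (hv : ∃ n : Nat, v = (n : Int) ∧ n < par.length)
    (h : ∃ k, piter par k v = some r) :
    ∃ k, k ≤ par.length ∧ piter par k v = some r := by
  have hfind := Nat.find_spec h
  by_cases hk : Nat.find h ≤ par.length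
  · exact ⟨Nat.find h, hk, hfind⟩
  exfalso
  have hdef : ∀ j, j ≤ Nat.find h → ∃ q : Nat, piter par j v = some (q : Int) ∧ q < par.length := by
    intro j hj
    obtain ⟨y, hy⟩ := piter_prefix_some hj hfind
    obtain ⟨q, rfl, hq⟩ := piter_range hv hy
    exact ⟨q, hy, hq⟩
  have hmaps : ∀ j ∈ Finset.range (par.length + 1),
      (fun j => ((piter par j v).getD 0).toNat) j ∈ Finset.range par.length := by
    intro j hj
    have hj' : j ≤ Nat.find h := by
      have := Finset.mem_range.mp hj; omega
    obtain ⟨q, hq, hql⟩ := hdef j hj'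
    simp [hq, hql]
  have hcard : (Finset.range par.length).card < (Finset.range (par.length + 1)).card := by
    simp
  obtain ⟨i, hi, j, hj, hne, hfe⟩ :=
    Finset.exists_ne_map_eq_of_card_lt_of_maps_to hcard hmaps
  have key : ∀ i j : Nat, i < j → j ≤ par.length →
      ((piter par i v).getD 0).toNat = ((piter par j v).getD 0).toNat → False := by
    intro i j hij hjm hfeq
    obtain ⟨qi, hqi, _⟩ := hdef i (by omega)
    obtain ⟨qj, hqj, _⟩ := hdef j (by omega)
    rw [hqi, hqj] at hfeq
    have hq : (qi : Int) = (qj : Int) := by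
      simp at hfeq; exact_mod_cast hfeq
    have heq : piter par i v = piter par j v := by rw [hqi, hqj, hq]
    have hdecomp : piter par (Nat.find h) v = some r := hfind
    have h1 : Nat.find h = j + (Nat.find h - j) := by omega
    rw [h1, piter_add, hqj] at hdecomp
    simp only [Option.bind_some] at hdecomp
    have h2 : piter par (i + (Nat.find h - j)) v = some r := by
      rw [piter_add, hqi, Option.bind_some, hq]
      exact hdecomp
    exact Nat.find_min h (by omega : i + (Nat.find h - j) < Nat.find h) h2
  rcases Nat.lt_or_ge i j with hij | hij
  · exact key i j hij (by have := Finset.mem_range.mp hj; omega) hfe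
  · have hij' : j < i := by omega
    exact key j i hij' (by have := Finset.mem_range.mp hi; omega) hfe.symm

-- ===== B-side lemmas =====

-- pvChain looks at its start node only through pyGet?
theorem pvChain_congr (par : List Int) (f : Nat) {x y : Int}
    (h : PySem.List.pyGet? par x = PySem.List.pyGet? par y) :
    pvChain par f x = pvChain par f y := by
  unfold pvChain
  rw [h]

theorem pyGet?_norm_eq {par : List Int} {p : Int} (h : PySem.Raise.InRange par.length p) :
    PySem.List.pyGet? par p = PySem.List.pyGet? par ((nrm par.length p : Nat) : Int) := by
  have h2 : PySem.Raise.InRange par.length ((nrm par.length p : Nat) : Int) := by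
    have := nrm_lt h
    constructor <;> omega
  rw [pyGet?_nrm h, pyGet?_nrm h2, nrm_natCast (nrm_lt h)]

theorem getD_mem {par : List Int} {n : Nat} (h : n < par.length) : par.getD n 0 ∈ par := by
  rw [List.getD_eq_getElem?_getD, List.getElem?_eq_getElem h]
  exact List.getElem_mem h

-- a chain that reaches the root slot passes the fuelled climb
theorem chain_complete (par : List Int) (root : Int)
    (hpre : ∀ p ∈ par, PySem.Raise.InRange par.length p)
    (h1 : par.getD (nrm par.length root) 0 = -1) :
    ∀ (k fuel n : Nat), k ≤ fuel → n < par.length →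
    piter par k ((n : Nat) : Int) = some ((nrm par.length root : Nat) : Int) →
    pvChain par fuel ((n : Nat) : Int) = true := by
  intro k
  induction k with
  | zero =>
    intro fuel n _ hn h
    simp only [piter, Option.some.injEq, Nat.cast_inj] at h
    unfold pvChain
    rw [pyGet?_nat hn, h, h1]
    simp
  | succ k ih =>
    intro fuel n hle hn h
    simp only [piter] at h
    rw [pstep_natCast_char hn hpre] at h
    by_cases hp : par.getD n 0 = -1
    · rw [if_pos hp] at h; simp at h
    · rw [if_neg hp, Option.bind_some] at h
      cases fuel with
      | zero => omega
      | succ f =>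
        unfold pvChain
        rw [pyGet?_nat hn]
        dsimp only
        rw [if_neg hp]
        have hmem := getD_mem hn
        have hinp := hpre _ hmem
        rw [pvChain_congr par f (pyGet?_norm_eq hinp)]
        exact ih f (nrm par.length (par.getD n 0)) (by omega) (nrm_lt hinp) h

-- a passed climb reaches the root slot (the unique -1 slot)
theorem chain_sound (par : List Int) (root : Int)
    (hpre : ∀ p ∈ par, PySem.Raise.InRange par.length p)
    (hu : ∀ q : Nat, q < par.length → par.getD q 0 = -1 → q = nrm par.length root) :
    ∀ (fuel n : Nat), n < par.length → pvChain par fuel ((n : Nat) : Int) = true →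
    ∃ k, piter par k ((n : Nat) : Int) = some ((nrm par.length root : Nat) : Int) := by
  intro fuel
  induction fuel with
  | zero =>
    intro n hn h
    unfold pvChain at h
    rw [pyGet?_nat hn] at h
    dsimp only at h
    by_cases hp : par.getD n 0 = -1
    · exact ⟨0, by simp [piter, hu n hn hp]⟩
    · rw [if_neg hp] at h
      exact absurd h Bool.false_ne_true
  | succ f ih =>
    intro n hn h
    unfold pvChain at h
    rw [pyGet?_nat hn] at h
    dsimp only at h
    by_cases hp : par.getD n 0 = -1
    · exact ⟨0, by simp [piter, hu n hn hp]⟩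
    · rw [if_neg hp] at h
      have hmem := getD_mem hn
      have hinp := hpre _ hmem
      rw [pvChain_congr par f (pyGet?_norm_eq hinp)] at h
      obtain ⟨k, hk⟩ := ih (nrm par.length (par.getD n 0)) (nrm_lt hinp) h
      refine ⟨k + 1, ?_⟩
      simp only [piter]
      rw [pstep_natCast_char hn hpre, if_neg hp, Option.bind_some]
      exact hk

-- count = 1 gives a unique position holding the value
theorem count_unique : ∀ (l : List Int) (a : Int), l.count a = 1 →
    ∀ i j : Nat, i < l.length → j < l.length → l.getD i 0 = a → l.getD j 0 = a → i = j := by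
  intro l
  induction l with
  | nil => intro a _ i j hi _ _ _; simp at hi
  | cons b t ih =>
    intro a hc i j hi hj hia hja
    have hcc : (b :: t).count a = t.count a + if b == a then 1 else 0 := by
      rw [List.count_cons]
    rw [hc] at hcc
    cases i with
    | zero =>
      cases j with
      | zero => rfl
      | succ j' =>
        exfalso
        simp only [List.getD_cons_zero] at hia
        simp only [List.getD_cons_succ] at hja
        have hmem : a ∈ t := hja ▸ getD_mem (by simpa using hj)
        have := List.count_pos_iff.mpr hmem
        simp [hia] at hcc
        omega
    | succ i' =>
      cases j with
      | zero =>
        exfalso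
        simp only [List.getD_cons_zero] at hja
        simp only [List.getD_cons_succ] at hia
        have hmem : a ∈ t := hia ▸ getD_mem (by simpa using hi)
        have := List.count_pos_iff.mpr hmem
        simp [hja] at hcc
        omega
      | succ j' =>
        simp only [List.getD_cons_succ] at hia hja
        have hct : t.count a = 1 := by
          by_cases hb : b = a
          · exfalso
            have hmem : a ∈ t := hia ▸ getD_mem (by simpa using hi)
            have := List.count_pos_iff.mpr hmem
            simp [hb] at hcc
            omega
          · simp [hb] at hcc; omega
        have := ih a hct i' j' (by simpa using hi) (by simpa using hj) hia hja
        omega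

-- a unique position holding the value gives count = 1
theorem count_of_unique : ∀ (l : List Int) (a : Int) (i : Nat), i < l.length →
    l.getD i 0 = a → (∀ j : Nat, j < l.length → l.getD j 0 = a → j = i) →
    l.count a = 1 := by
  intro l
  induction l with
  | nil => intro a i hi _ _; simp at hi
  | cons b t ih =>
    intro a i hi hia hu
    rw [List.count_cons]
    cases i with
    | zero =>
      simp only [List.getD_cons_zero] at hia
      have hct : t.count a = 0 := by
        rw [List.count_eq_zero]
        intro hmem
        obtain ⟨j, hj, hje⟩ := List.mem_iff_getElem.mp hmem
        have hgd : t.getD j 0 = a := by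
          rw [List.getD_eq_getElem?_getD, List.getElem?_eq_getElem hj, hje]; rfl
        have := hu (j + 1) (by simpa using hj) (by simpa using hgd)
        omega
      simp [hct, hia]
    | succ i' =>
      simp only [List.getD_cons_succ] at hia
      have hb : b ≠ a := by
        intro hab
        have := hu 0 (by simp) (by simp [hab])
        omega
      have hct : t.count a = 1 := by
        refine ih a i' (by simpa using hi) hia ?_
        intro j hj hja
        have := hu (j + 1) (by simpa using hj) (by simpa using hja)
        omega
      simp [hct, hb]

theorem all_id_iff (vis : List Bool) :
    (vis.all (fun b => b) = true) ↔ ∀ n : Nat, n < vis.length → vis.getD n false = true := by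
  rw [List.all_eq_true]
  constructor
  · intro h n hn
    rw [List.getD_eq_getElem?_getD, List.getElem?_eq_getElem hn]
    exact h _ (List.getElem_mem hn)
  · intro h b hb
    obtain ⟨n, hn, rfl⟩ := List.mem_iff_getElem.mp hb
    have := h n hn
    rw [List.getD_eq_getElem?_getD, List.getElem?_eq_getElem hn] at this
    exact this

-- characterisation of B
theorem treeOk_alt_char (par : List Int) (root : Int) (hpre : Pre_treeOk par root) :
    (treeOk_alt par root = true ↔ RHS par root) := by
  obtain ⟨hne, hroot, hent⟩ := hpre
  have hmpos : 0 < par.length := List.length_pos_of_ne_nil hne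
  have hrr : nrm par.length root < par.length := nrm_lt hroot
  have hg0 : PySem.List.pyGet? par root = some (par.getD (nrm par.length root) 0) := by
    rw [pyGet?_nrm hroot]
    simp [List.getD_eq_getElem?_getD, List.getElem?_eq_getElem hrr]
  have hps : pstep par ((nrm par.length root : Nat) : Int) =
      if par.getD (nrm par.length root) 0 = -1 then none
      else some ((nrm par.length (par.getD (nrm par.length root) 0) : Nat) : Int) :=
    pstep_natCast_char hrr hent
  unfold treeOk_alt
  dsimp only
  rw [hg0]
  dsimp only
  by_cases hq : par.getD (nrm par.length root) 0 = -1
  · by_cases hc : PySem.List.count par (-1) = 1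
    · rw [if_neg (by simp only [ne_eq, not_or, not_not]; exact ⟨hq, hc⟩)]
      have hcnt : par.count (-1) = 1 := by rw [← PySem.List.count_eq]; exact hc
      have hu : ∀ q : Nat, q < par.length → par.getD q 0 = -1 → q = nrm par.length root :=
        fun q hql hqa => count_unique par (-1) hcnt q (nrm par.length root) hql hrr hqa hq
      constructor
      · intro hall
        refine ⟨by rw [hps, if_pos hq], ?_⟩
        intro n hn
        have := (List.all_eq_true.mp hall) n (List.mem_range.mpr hn)
        exact chain_sound par root hent hu par.length n hn this
      · rintro ⟨_, hall⟩
        apply List.all_eq_true.mpr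
        intro n hn
        have hn' := List.mem_range.mp hn
        obtain ⟨k, hkle, hk⟩ := upreach_bound par _ ⟨n, rfl, hn'⟩ (hall n hn')
        exact chain_complete par root hent hq k par.length n hkle hn' hk
    · rw [if_pos (Or.inr hc)]
      constructor
      · intro h; simp at h
      · rintro ⟨h1, h2⟩
        exfalso
        apply hc
        rw [PySem.List.count_eq]
        refine count_of_unique par (-1) (nrm par.length root) hrr hq ?_
        intro j hj hja
        by_contra hne'
        obtain ⟨k, hk⟩ := h2 j hj
        cases k with
        | zero =>
          simp only [piter, Option.some.injEq, Nat.cast_inj] at hk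
          exact hne' hk
        | succ k' =>
          simp only [piter] at hk
          rw [pstep_natCast_char hj hent, if_pos hja] at hk
          simp at hk
  · rw [if_pos (Or.inl hq)]
    constructor
    · intro h; simp at h
    · rintro ⟨h1, _⟩
      rw [hps, if_neg hq] at h1
      simp at h1

-- ===== A-side invariant =====
structure AInv (par : List Int) (root : Int) (vis : List Bool) (stk : List Int) : Prop where
  hlen : vis.length = par.length
  hrng : ∀ w ∈ stk, PySem.Raise.InRange par.length w
  hnd : (stk.map (nrm par.length)).Nodup
  hsvis : ∀ w ∈ stk, vis.getD (nrm par.length w) false = true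
  hreach : ∀ n : Nat, n < par.length → vis.getD n false = true → UpReach par root ((n : Nat) : Int)
  hroot : vis.getD (nrm par.length root) false = true
  hpar : ∀ n : Nat, n < par.length → vis.getD n false = true → n ≠ nrm par.length root →
    ∃ p : Nat, p < par.length ∧ pstep par ((n : Nat) : Int) = some ((p : Nat) : Int) ∧
      vis.getD p false = true ∧ p ∉ stk.map (nrm par.length)
  hcl : ∀ p : Nat, p < par.length → vis.getD p false = true → p ∉ stk.map (nrm par.length) →
    ∀ n : Nat, n < par.length → pstep par ((n : Nat) : Int) = some ((p : Nat) : Int) →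
      vis.getD n false = true
  hrp : ∀ q : Nat, q < par.length →
    pstep par ((nrm par.length root : Nat) : Int) = some ((q : Nat) : Int) →
    vis.getD q false = true → q ∈ stk.map (nrm par.length)

theorem loop_iff_empty (par : List Int) (root : Int) (vis : List Bool)
    (hinv : AInv par root vis []) :
    (vis.all (fun b => b) = true ↔ RHS par root) := by
  constructor
  · intro hall
    have hv : ∀ n : Nat, n < par.length → vis.getD n false = true := by
      intro n hn
      exact (all_id_iff vis).mp hall n (by rw [hinv.hlen]; exact hn)
    refine ⟨?_, fun n hn => hinv.hreach n hn (hv n hn)⟩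
    cases hx : pstep par ((nrm par.length root : Nat) : Int) with
    | none => rfl
    | some x =>
      obtain ⟨q, rfl, hq⟩ := pstep_some_range hx
      have := hinv.hrp q hq hx (hv q hq)
      simp at this
  · rintro ⟨h1, h2⟩
    rw [all_id_iff]
    intro n hn
    rw [hinv.hlen] at hn
    obtain ⟨k, hk⟩ := h2 n hn
    clear hn
    induction k generalizing n with
    | zero =>
      simp only [piter, Option.some.injEq] at hk
      have : n = nrm par.length root := by exact_mod_cast hk
      rw [this]
      exact hinv.hroot
    | succ k ih =>
      simp only [piter] at hk
      cases hs : pstep par ((n : Nat) : Int) with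
      | none => rw [hs] at hk; simp at hk
      | some x =>
        rw [hs] at hk
        simp only [Option.bind_some] at hk
        obtain ⟨q, rfl, hq⟩ := pstep_some_range hs
        have hvq := ih q hk
        have hnlt : n < par.length := by
          cases hx : PySem.List.pyGet? par ((n : Nat) : Int) with
          | none => unfold pstep at hs; rw [hx] at hs; simp at hs
          | some e =>
            have := inRange_of_pyGet?_some hx
            obtain ⟨_, h⟩ := this
            omega
        exact hinv.hcl q hq hvq (by simp) n hnlt hs

theorem loop_iff (par : List Int) (root : Int) (hpre : Pre_treeOk par root) :
    ∀ (M : Nat) (vis : List Bool) (stk : List Int),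
    2 * vis.count false + stk.length ≤ M → AInv par root vis stk →
    (pvLoop (pvBuildG par) vis stk = true ↔ RHS par root) := by
  obtain ⟨hne, hroot0, hent⟩ := hpre
  intro M
  induction M with
  | zero =>
    intro vis stk hM hinv
    cases stk with
    | nil =>
      rw [pvLoop]
      exact loop_iff_empty par root vis hinv
    | cons v rest => simp [List.length_cons] at hM
  | succ M ih =>
    intro vis stk hM hinv
    cases stk with
    | nil =>
      rw [pvLoop]
      exact loop_iff_empty par root vis hinv
    | cons v rest =>
      rw [pvLoop]
      have hvin : PySem.Raise.InRange par.length v := hinv.hrng v List.mem_cons_self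
      have hult : nrm par.length v < par.length := nrm_lt hvin
      have hglen : (pvBuildG par).length = par.length := buildG_length par
      have hginr : PySem.Raise.InRange (pvBuildG par).length v := by rw [hglen]; exact hvin
      have hgd : PySem.List.pyGetD (pvBuildG par) v [] = childList par (nrm par.length v) := by
        rw [pyGetD_nrm hginr]
        rw [show nrm (pvBuildG par).length v = nrm par.length v by rw [hglen]]
        exact buildG_getD par hent _ hult
      rw [hgd]
      have hws : ∀ w ∈ childList par (nrm par.length v), PySem.Raise.InRange vis.length w := by
        intro w hw
        obtain ⟨n, hn, rfl, _⟩ := mem_childList.mp hw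
        rw [hinv.hlen]
        constructor <;> omega
      have hndws : ((childList par (nrm par.length v)).map (nrm vis.length)).Nodup := by
        rw [hinv.hlen]; exact childList_nodup par _
      have hclmem : ∀ n : Nat, ((n : Nat) : Int) ∈ childList par (nrm par.length v) ↔
          n < par.length ∧ pstep par ((n : Nat) : Int) = some ((nrm par.length v : Nat) : Int) := by
        intro n
        rw [mem_childList]
        constructor
        · rintro ⟨n', hn', he, hs⟩
          have : n = n' := by exact_mod_cast he
          subst this
          exact ⟨hn', hs⟩
        · rintro ⟨hn, hs⟩
          exact ⟨n, hn, rfl, hs⟩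
      split
      next hscan =>
        -- early `return False`: the already-visited child must be the root
        obtain ⟨w, hwmem, hwvis⟩ := pvScan_none_char _ _ _ hws hndws hscan
        obtain ⟨n, hn, rfl, hnstep⟩ := mem_childList.mp hwmem
        rw [hinv.hlen, nrm_natCast hn] at hwvis
        have hnr : n = nrm par.length root := by
          by_contra hne'
          obtain ⟨p, hp, hpstep, hpvis, hpnot⟩ := hinv.hpar n hn hwvis hne'
          have hpu : p = nrm par.length v := by
            rw [hpstep] at hnstep
            exact_mod_cast Option.some.inj hnstep
          subst hpu
          exact hpnot (by simp)
        constructor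
        · intro hfalse; exact absurd hfalse (by simp)
        · rintro ⟨h1, _⟩
          rw [hnr] at hnstep
          rw [h1] at hnstep
          simp at hnstep
      next vis' stk' hscan =>
        obtain ⟨hlen', hstk', hchar, hfreshIn, hndws2⟩ := pvScan_some_char _ _ _ _ _ hscan
        rw [hinv.hlen] at hchar hfreshIn hndws2
        have hfresh : ∀ n : Nat, ((n : Nat) : Int) ∈ childList par (nrm par.length v) →
            vis.getD n false = false := by
          intro n hmem
          have := (hfreshIn _ hmem).2
          rwa [nrm_natCast ((hclmem n).mp hmem).1] at this
        have hchar' : ∀ n : Nat, (vis'.getD n false = true ↔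
            (vis.getD n false = true ∨ ((n : Nat) : Int) ∈ childList par (nrm par.length v))) := by
          intro n
          rw [hchar n]
          constructor
          · rintro (h | ⟨w, hw, hnr⟩)
            · exact Or.inl h
            · obtain ⟨n', hn', rfl, hs⟩ := mem_childList.mp hw
              rw [nrm_natCast hn'] at hnr
              subst hnr
              exact Or.inr hw
          · rintro (h | h)
            · exact Or.inl h
            · exact Or.inr ⟨_, h, nrm_natCast ((hclmem n).mp h).1⟩
        have hmapstk : stk'.map (nrm par.length) =
            ((childList par (nrm par.length v)).reverse.map (nrm par.length)) ++
              rest.map (nrm par.length) := by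
          rw [hstk', List.map_append]
        have hApart : ∀ p : Nat,
            p ∈ ((childList par (nrm par.length v)).reverse.map (nrm par.length)) ↔
            ((p : Nat) : Int) ∈ childList par (nrm par.length v) := by
          intro p
          rw [List.mem_map]
          constructor
          · rintro ⟨w, hw, hnr⟩
            rw [List.mem_reverse] at hw
            obtain ⟨n', hn', rfl, _⟩ := mem_childList.mp hw
            rw [nrm_natCast hn'] at hnr
            subst hnr
            exact hw
          · intro h
            exact ⟨_, List.mem_reverse.mpr h, nrm_natCast ((hclmem p).mp h).1⟩
        have hndtail : (rest.map (nrm par.length)).Nodup ∧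
            nrm par.length v ∉ rest.map (nrm par.length) := by
          have := hinv.hnd
          simp only [List.map_cons, List.nodup_cons] at this
          exact ⟨this.2, this.1⟩
        have hvisu : vis.getD (nrm par.length v) false = true :=
          hinv.hsvis v List.mem_cons_self
        have hinv' : AInv par root vis' stk' := by
          refine ⟨?_, ?_, ?_, ?_, ?_, ?_, ?_, ?_, ?_⟩
          · rw [hlen', hinv.hlen]
          · intro w hw
            rw [hstk'] at hw
            rcases List.mem_append.mp hw with hw | hw
            · rw [List.mem_reverse] at hw
              obtain ⟨n, hn, rfl, _⟩ := mem_childList.mp hw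
              constructor <;> omega
            · exact hinv.hrng w (List.mem_cons_of_mem _ hw)
          · rw [hmapstk]
            rw [List.nodup_append]
            refine ⟨?_, hndtail.1, ?_⟩
            · rw [List.map_reverse, List.nodup_reverse]
              exact hndws2
            · intro p hpA q hqB hpq
              subst hpq
              obtain ⟨w, hw, hnw⟩ := List.mem_map.mp hqB
              have hvw := hinv.hsvis w (List.mem_cons_of_mem _ hw)
              rw [hnw] at hvw
              have := hfresh _ ((hApart _).mp hpA)
              rw [this] at hvw
              exact Bool.noConfusion hvw
          · intro w hw
            rw [hstk'] at hw
            rcases List.mem_append.mp hw with hw | hw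
            · rw [List.mem_reverse] at hw
              rw [hchar' (nrm par.length w)]
              obtain ⟨n, hn, rfl, _⟩ := mem_childList.mp hw
              rw [nrm_natCast hn]
              exact Or.inr hw
            · rw [hchar']
              exact Or.inl (hinv.hsvis w (List.mem_cons_of_mem _ hw))
          · intro n hn hv'
            rcases (hchar' n).mp hv' with h | h
            · exact hinv.hreach n hn h
            · have hs := ((hclmem n).mp h).2
              obtain ⟨k, hk⟩ := hinv.hreach _ hult hvisu
              exact ⟨k + 1, by simp only [piter]; rw [hs, Option.bind_some]; exact hk⟩
          · rw [hchar']
            exact Or.inl hinv.hroot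
          · intro n hn hv' hne'
            rcases (hchar' n).mp hv' with h | h
            · obtain ⟨p, hp, hpstep, hpvis, hpnot⟩ := hinv.hpar n hn h hne'
              refine ⟨p, hp, hpstep, (hchar' p).mpr (Or.inl hpvis), ?_⟩
              rw [hmapstk]
              intro hmem
              rcases List.mem_append.mp hmem with hm | hm
              · have := hfresh _ ((hApart _).mp hm)
                rw [this] at hpvis
                exact Bool.noConfusion hpvis
              · exact hpnot (by simp only [List.map_cons]; exact List.mem_cons_of_mem _ hm)
            · have hs := ((hclmem n).mp h).2
              refine ⟨nrm par.length v, hult, hs, (hchar' _).mpr (Or.inl hvisu), ?_⟩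
              rw [hmapstk]
              intro hmem
              rcases List.mem_append.mp hmem with hm | hm
              · have := hfresh _ ((hApart _).mp hm)
                rw [this] at hvisu
                exact Bool.noConfusion hvisu
              · exact hndtail.2 hm
          · intro p hp hpvis' hpnot n hn hs
            have hpnotA : ¬ ((p : Nat) : Int) ∈ childList par (nrm par.length v) := by
              intro hmem
              exact hpnot (by rw [hmapstk]; exact List.mem_append.mpr (Or.inl ((hApart _).mpr hmem)))
            have hpvis : vis.getD p false = true := by
              rcases (hchar' p).mp hpvis' with h | h
              · exact h
              · exact absurd h hpnotA
            by_cases hpu : p = nrm par.length v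
            · subst hpu
              exact (hchar' n).mpr (Or.inr ((hclmem n).mpr ⟨hn, hs⟩))
            · have hpnot' : p ∉ (v :: rest).map (nrm par.length) := by
                simp only [List.map_cons, List.mem_cons]
                rintro (h | h)
                · exact hpu h
                · exact hpnot (by rw [hmapstk]; exact List.mem_append.mpr (Or.inr h))
              exact (hchar' n).mpr (Or.inl (hinv.hcl p hp hpvis hpnot' n hn hs))
          · intro q hq hs hqvis'
            rcases (hchar' q).mp hqvis' with h | h
            · have := hinv.hrp q hq hs h
              simp only [List.map_cons, List.mem_cons] at this
              rcases this with h' | h'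
              · exfalso
                have hrrmem : ((nrm par.length root : Nat) : Int) ∈
                    childList par (nrm par.length v) := by
                  apply (hclmem _).mpr
                  refine ⟨nrm_lt hroot0, ?_⟩
                  rw [← h']
                  exact hs
                have hfr := hfresh _ hrrmem
                have hrt := hinv.hroot
                rw [hfr] at hrt
                exact Bool.noConfusion hrt
              · rw [hmapstk]
                exact List.mem_append.mpr (Or.inr h')
            · rw [hmapstk]
              exact List.mem_append.mpr (Or.inl ((hApart _).mpr h))
        have hmeas := pvScan_measure _ _ _ _ _ hscan
        apply ih vis' stk' ?_ hinv'
        simp only [List.length_cons] at hM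
        omega

-- characterisation of A
theorem treeOk_char (par : List Int) (root : Int) (hpre : Pre_treeOk par root) :
    (treeOk par root = true ↔ RHS par root) := by
  obtain ⟨hne, hroot, hent⟩ := hpre
  have hrr : nrm par.length root < par.length := nrm_lt hroot
  have hlenrep : (List.replicate par.length (false : Bool)).length = par.length := by simp
  have hinr' : PySem.Raise.InRange (List.replicate par.length (false : Bool)).length root := by
    rw [hlenrep]; exact hroot
  have hvis0 : PySem.List.pySetD (List.replicate par.length (false : Bool)) root true =
      (List.replicate par.length (false : Bool)).set (nrm par.length root) true := by
    rw [pySetD_nrm hinr']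
    rw [show nrm (List.replicate par.length (false : Bool)).length root = nrm par.length root by
      rw [hlenrep]]
  have hget0 : ∀ n : Nat,
      ((List.replicate par.length (false : Bool)).set (nrm par.length root) true).getD n false =
        (if n = nrm par.length root then true else false) := by
    intro n
    rw [getD_set_lt _ _ _ _ _ (by rw [hlenrep]; exact hrr)]
    split_ifs with h
    · rfl
    · rw [List.getD_eq_getElem?_getD, List.getElem?_replicate]
      split_ifs <;> rfl
  unfold treeOk
  dsimp only
  rw [hvis0]
  apply loop_iff par root ⟨hne, hroot, hent⟩
    (2 * ((List.replicate par.length (false : Bool)).set (nrm par.length root) true).count false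
      + 1)
  · simp
  · refine ⟨?_, ?_, ?_, ?_, ?_, ?_, ?_, ?_, ?_⟩
    · simp
    · intro w hw
      rw [List.mem_singleton] at hw
      subst hw
      exact hroot
    · simp
    · intro w hw
      rw [List.mem_singleton] at hw
      subst hw
      rw [hget0]
      simp
    · intro n hn hv
      rw [hget0] at hv
      split_ifs at hv with h
      subst h
      exact ⟨0, rfl⟩
    · rw [hget0]; simp
    · intro n hn hv hne'
      rw [hget0] at hv
      split_ifs at hv with h
      exact absurd h hne'
    · intro p hp hv hnot n hn hs
      rw [hget0] at hv
      split_ifs at hv with h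
      exact absurd (by simp [h]) hnot
    · intro q hq hs hv
      rw [hget0] at hv
      split_ifs at hv with h
      simp [h]

-- ===== VERDICT (by name: the statement is the Claim_ definition above) =====
theorem treeOk_spec : Claim_equal_treeOk := by
  intro par root _ hpre
  unfold Spec_treeOk
  have h1 := treeOk_char par root hpre
  have h2 := treeOk_alt_char par root hpre
  cases ha : treeOk par root with
  | true => exact (h2.mpr (h1.mp ha)).symm
  | false =>
    cases hb : treeOk_alt par root with
    | false => rfl
    | true =>
      have := h1.mpr (h2.mp hb)
      rw [ha] at this
      exact Bool.noConfusion this
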